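-- pv_equiv track=rewrite | github.com/xieeddebug/pptAI- | app.py | should_skip_text
-- ===== SOURCE A (Python) =====
-- def should_skip_text(text):
--     # 检查是否包含需要跳过的信息
--     if not text:
--         return True
--
--     # 转换为小写进行检查
--     text_lower = text.lower()
--
--     # 检查关键词
--     skip_keywords = ['汇报人', '单位', 'monday', 'tuesday', 'wednesday', 'thursday', 'friday', 'saturday', 'sunday']
--     if any(keyword in text_lower for keyword in skip_keywords):
--         return True
--
--     # 检查年份（2000-2099）
--     if any(str(year) in text for year in range(2000, 2100)):
--         return True
--
--     # 检查月份
--     months = ['月', 'january', 'february', 'march', 'april', 'may', 'june', 'july', 'august', 'september', 'october', 'november', 'december']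
--     if any(month in text_lower for month in months):
--         return True
--
--     return False
-- ===== SOURCE B (Python) =====
-- # B: single combined word list (one membership pass) and a left-to-right
-- # character scan for a '20XX' year instead of 100 substring searches.
-- _WORDS = ['汇报人', '单位', 'monday', 'tuesday', 'wednesday', 'thursday',
--           'friday', 'saturday', 'sunday',
--           '月', 'january', 'february', 'march', 'april', 'may', 'june', 'july',
--           'august', 'september', 'october', 'november', 'december']
--
-- def should_skip_text(text):
--     if not text:
--         return True
--     low = text.lower()
--     if any(w in low for w in _WORDS):
--         return True
--     for i in range(len(text) - 3):
--         if (text[i] == '2' and text[i + 1] == '0'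
--                 and '0' <= text[i + 2] <= '9' and '0' <= text[i + 3] <= '9'):
--             return True
--     return False
-- ===== Notes on version B (the rewrite author's own statement) =====
-- stated objective: alternative
-- what changed: The year check no longer searches the text for each of the 100 strings str(2000)..str(2099): B makes one left-to-right scan over the characters looking for a 2, a 0 and two digits in a row, and the two keyword/month membership passes are merged into a single pass over one combined word list.
import Mathlib
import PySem

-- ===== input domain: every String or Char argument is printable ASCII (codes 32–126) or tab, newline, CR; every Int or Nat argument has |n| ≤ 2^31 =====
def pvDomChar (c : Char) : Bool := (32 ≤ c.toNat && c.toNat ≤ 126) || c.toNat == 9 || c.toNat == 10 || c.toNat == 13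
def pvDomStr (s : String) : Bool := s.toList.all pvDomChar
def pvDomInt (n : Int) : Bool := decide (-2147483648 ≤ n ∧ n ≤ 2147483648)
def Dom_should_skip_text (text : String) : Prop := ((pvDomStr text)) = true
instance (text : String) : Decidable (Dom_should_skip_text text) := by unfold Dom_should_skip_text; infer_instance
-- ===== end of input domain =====

-- B replaces the 100 substring searches for str(2000)..str(2099) by one character
-- scan for '2','0',digit,digit and merges the two word-membership passes into one
-- (objective: alternative; same result on every input).

-- ===== PORT A =====
def pvSkipKeywords : List String :=
  ["汇报人", "单位", "monday", "tuesday", "wednesday", "thursday", "friday",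
   "saturday", "sunday"]

def pvMonths : List String :=
  ["月", "january", "february", "march", "april", "may", "june", "july",
   "august", "september", "october", "november", "december"]

def should_skip_text (text : String) : Bool :=
  if text == "" then true
  else
    let text_lower := PySem.Str.lower text
    if pvSkipKeywords.any (fun keyword => PySem.Str.isIn keyword text_lower) then true
    else if (PySem.List.pyRange 2000 2100 1).any
        (fun year => PySem.Str.isIn (PySem.Int.toStr year) text) then true
    else if pvMonths.any (fun month => PySem.Str.isIn month text_lower) then true
    else false

-- ===== PORT B =====
def pvWords : List String :=
  ["汇报人", "单位", "monday", "tuesday", "wednesday", "thursday", "friday",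
   "saturday", "sunday",
   "月", "january", "february", "march", "april", "may", "june", "july",
   "august", "september", "october", "november", "december"]

-- the index loop 'for i in range(len(text)-3)' over text[i..i+3], as structural recursion
def pvHasYear : List Char → Bool
  | c1 :: rest@(c2 :: c3 :: c4 :: _) =>
      (c1 == '2' && c2 == '0' && ('0' ≤ c3 && c3 ≤ '9') && ('0' ≤ c4 && c4 ≤ '9'))
        || pvHasYear rest
  | _ => false

def should_skip_text_alt (text : String) : Bool :=
  if text == "" then true
  else
    let low := PySem.Str.lower text
    if pvWords.any (fun w => PySem.Str.isIn w low) then true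
    else pvHasYear text.toList

-- ===== PRECONDITION & SPEC =====
def Spec_should_skip_text (text : String) (out : Bool) : Prop := out = should_skip_text_alt text
instance (text : String) (out : Bool) : Decidable (Spec_should_skip_text text out) := by unfold Spec_should_skip_text; infer_instance

-- ===== CLAIM (what is proved, stated in full; the proofs are below) =====
def Claim_equal_should_skip_text : Prop := ∀ (text : String), Dom_should_skip_text text → Spec_should_skip_text text (should_skip_text text)

-- ===== LEMMAS AND PROOFS =====

-- str(2000+k) for k < 100 is '2','0' then the two digit characters, and those are digits
theorem pvToChars_fact : ∀ k : Fin 100,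
    PySem.Int.toChars ((2000 + k.1 : Nat) : Int)
      = ['2', '0', Char.ofNat (48 + k.1 / 10), Char.ofNat (48 + k.1 % 10)]
    ∧ '0' ≤ Char.ofNat (48 + k.1 / 10) ∧ Char.ofNat (48 + k.1 / 10) ≤ '9'
    ∧ '0' ≤ Char.ofNat (48 + k.1 % 10) ∧ Char.ofNat (48 + k.1 % 10) ≤ '9' := by
  decide


theorem pvDigit_toNat {c : Char} : ('0' ≤ c ∧ c ≤ '9') ↔ (48 ≤ c.toNat ∧ c.toNat ≤ 57) := Iff.rfl

theorem pvHasYear_iff (cs : List Char) : pvHasYear cs = true ↔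
    ∃ c3 c4 t, ('0' ≤ c3 ∧ c3 ≤ '9') ∧ ('0' ≤ c4 ∧ c4 ≤ '9')
      ∧ ('2' :: '0' :: c3 :: c4 :: t) <:+ cs := by
  induction cs with
  | nil => simp [pvHasYear]
  | cons c1 rest ih =>
    rcases rest with _ | ⟨c2, _ | ⟨c3, _ | ⟨c4, t⟩⟩⟩
    · simp [pvHasYear, List.suffix_cons_iff]
    · simp [pvHasYear, List.suffix_cons_iff]
    · simp [pvHasYear, List.suffix_cons_iff]
    · constructor
      · intro h
        simp only [pvHasYear] at h
        rcases Bool.or_eq_true .. |>.mp h with hg | hr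
        · simp only [Bool.and_eq_true, beq_iff_eq, decide_eq_true_eq] at hg
          obtain ⟨⟨⟨h1, h2⟩, h3a, h3b⟩, h4a, h4b⟩ := hg
          exact ⟨c3, c4, t, ⟨h3a, h3b⟩, ⟨h4a, h4b⟩, by
            rw [List.suffix_cons_iff]; left; rw [h1, h2]⟩
        · obtain ⟨a, b, u, da, db, hs⟩ := ih.mp hr
          exact ⟨a, b, u, da, db, hs.trans (List.suffix_cons c1 _)⟩
      · rintro ⟨a, b, u, da, db, hs⟩
        simp only [pvHasYear]
        rcases List.suffix_cons_iff.mp hs with heq | hsuf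
        · injection heq with e1 heq; injection heq with e2 heq
          injection heq with e3 heq; injection heq with e4 _
          subst e1; subst e2; subst e3; subst e4
          apply Bool.or_eq_true .. |>.mpr; left
          simp [da.1, da.2, db.1, db.2]
        · exact Bool.or_eq_true .. |>.mpr (Or.inr (ih.mpr ⟨a, b, u, da, db, hsuf⟩))

theorem pvYear_eq (text : String) :
    (PySem.List.pyRange 2000 2100 1).any
        (fun year => PySem.Str.isIn (PySem.Int.toStr year) text)
      = pvHasYear text.toList := by
  apply Bool.eq_iff_iff.mpr
  rw [List.any_eq_true, pvHasYear_iff]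
  constructor
  · rintro ⟨y, hy, hin⟩
    rw [PySem.List.mem_pyRange_one] at hy
    rw [PySem.Str.isIn_iff_infix, PySem.Int.toList_toStr] at hin
    have hk : (y - 2000).toNat < 100 := by omega
    have hyk : y = ((2000 + (y - 2000).toNat : Nat) : Int) := by omega
    obtain ⟨hch, d1a, d1b, d2a, d2b⟩ := pvToChars_fact ⟨(y - 2000).toNat, hk⟩
    rw [hyk, hch] at hin
    obtain ⟨s, u, hsu⟩ := hin
    exact ⟨_, _, u, ⟨d1a, d1b⟩, ⟨d2a, d2b⟩, s, by simpa using hsu⟩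
  · rintro ⟨a, b, u, da, db, s, hs⟩
    have ha := pvDigit_toNat.mp da
    have hb := pvDigit_toNat.mp db
    set k : Nat := (a.toNat - 48) * 10 + (b.toNat - 48) with hkdef
    have hk : k < 100 := by omega
    obtain ⟨hch, -, -, -, -⟩ := pvToChars_fact ⟨k, hk⟩
    have e1 : 48 + k / 10 = a.toNat := by omega
    have e2 : 48 + k % 10 = b.toNat := by omega
    rw [e1, e2, Char.ofNat_toNat, Char.ofNat_toNat] at hch
    refine ⟨((2000 + k : Nat) : Int), ?_, ?_⟩
    · rw [PySem.List.mem_pyRange_one]; omega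
    · rw [PySem.Str.isIn_iff_infix, PySem.Int.toList_toStr, hch]
      exact ⟨s, u, by rw [← hs]; simp⟩

-- ===== VERDICT (by name: the statement is the Claim_ definition above) =====
theorem should_skip_text_spec : Claim_equal_should_skip_text := by
  intro text _
  unfold Spec_should_skip_text should_skip_text should_skip_text_alt
  by_cases he : text == ""
  · simp [he]
  · simp only [he]
    rw [pvYear_eq]
    have hw : pvWords.any (fun w => PySem.Str.isIn w (PySem.Str.lower text))
        = (pvSkipKeywords.any (fun w => PySem.Str.isIn w (PySem.Str.lower text))
           || pvMonths.any (fun w => PySem.Str.isIn w (PySem.Str.lower text))) := by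
      have : pvWords = pvSkipKeywords ++ pvMonths := rfl
      rw [this, List.any_append]
    rw [hw]
    cases pvSkipKeywords.any (fun w => PySem.Str.isIn w (PySem.Str.lower text)) <;>
      cases pvMonths.any (fun w => PySem.Str.isIn w (PySem.Str.lower text)) <;>
      cases pvHasYear text.toList <;> simp
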